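-- pv_equiv track=rewrite | github.com/joshorig/orchestrator | bin/worker.py | recent_work_entries
-- ===== SOURCE A (Python) =====
-- def recent_work_entries(text, limit=50):
--     lines = text.splitlines()
--     if not lines:
--         return ""
--     prefix = []
--     idx = 0
--     while idx < len(lines) and not lines[idx].startswith("## "):
--         prefix.append(lines[idx])
--         idx += 1
--     entries = []
--     current = []
--     for line in lines[idx:]:
--         if line.startswith("## ") and current:
--             entries.append("\n".join(current))
--             current = [line]
--         else:
--             current.append(line)
--     if current:
--         entries.append("\n".join(current))
--     return "\n".join(prefix + entries[:limit]).strip()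
-- ===== SOURCE B (Python) =====
-- def recent_work_entries(text, limit=50):
--     lines = text.splitlines()
--     first = _next_header(lines, 0)
--     prefix = lines[:first]
--     entries = []
--     rest = lines[first:]
--     while rest:
--         j = _next_header(rest, 1)
--         entries.append("\n".join(rest[:j]))
--         rest = rest[j:]
--     return "\n".join(prefix + entries[:limit]).strip()
--
--
-- def _next_header(lines, start):
--     for i in range(start, len(lines)):
--         if lines[i].startswith("## "):
--             return i
--     return len(lines)
-- ===== Notes on version B (the rewrite author's own statement) =====
-- stated objective: alternative
-- what changed: Replaced the streaming accumulate-and-flush loop (prefix while-loop plus a fold carrying a current buffer with flushes at header lines) by a find-next-boundary-then-slice decomposition: locate the next header-line index and slice whole entries out directly.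
import Mathlib
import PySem

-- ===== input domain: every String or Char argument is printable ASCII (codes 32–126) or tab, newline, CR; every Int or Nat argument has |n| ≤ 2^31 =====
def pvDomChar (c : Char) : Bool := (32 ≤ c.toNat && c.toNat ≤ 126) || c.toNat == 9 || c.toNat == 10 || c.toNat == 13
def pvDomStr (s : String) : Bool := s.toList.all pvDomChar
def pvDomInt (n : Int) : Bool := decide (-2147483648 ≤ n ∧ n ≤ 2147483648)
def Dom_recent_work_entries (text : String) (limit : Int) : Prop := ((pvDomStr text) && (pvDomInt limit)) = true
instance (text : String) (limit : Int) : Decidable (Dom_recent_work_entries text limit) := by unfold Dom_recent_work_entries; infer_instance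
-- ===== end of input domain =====

-- B replaces A's streaming accumulate-and-flush loop by find-next-header-index-then-slice
-- (alternative decomposition, same asymptotic cost).

-- ===== PORT A =====
-- the 'while idx < len(lines) and not lines[idx].startswith("## ")' loop:
-- returns (prefix collected, final idx)
def pvAWhile (lines : List String) (idx : Nat) : List String × Nat :=
  if hlt : idx < lines.length then
    if ¬ (PySem.Str.startswith lines[idx] "## ") then
      let r := pvAWhile lines (idx + 1)
      (lines[idx] :: r.1, r.2)
    else ([], idx)
  else ([], idx)
termination_by lines.length - idx

def recent_work_entries (text : String) (limit : Int) : String :=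
  let lines := PySem.Str.splitlines text
  if lines = [] then ""
  else
    let pr := pvAWhile lines 0
    -- for line in lines[idx:] with state (entries, current)
    let st := (PySem.List.slice lines (some ((pr.2 : Nat) : Int)) none).foldl
      (fun (s : List String × List String) line =>
        if PySem.Str.startswith line "## " && !s.2.isEmpty then
          (s.1 ++ [PySem.Str.join "\n" s.2], [line])
        else (s.1, s.2 ++ [line])) ([], [])
    let entries := if !st.2.isEmpty then st.1 ++ [PySem.Str.join "\n" st.2] else st.1
    PySem.Str.strip (PySem.Str.join "\n" (pr.1 ++ PySem.List.slice entries none (some limit)))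

-- ===== PORT B =====
-- _next_header(lines, start): first index ≥ start whose line starts with "## ", else len(lines)
def pvNextHeader (lines : List String) (i : Nat) : Nat :=
  if hlt : i < lines.length then
    if PySem.Str.startswith lines[i] "## " then i else pvNextHeader lines (i + 1)
  else lines.length
termination_by lines.length - i

-- needed by pvCollect's termination: _next_header(rest, 1) ≥ 1 on a nonempty rest
theorem pvNextHeader_ge (lines : List String) (i : Nat) :
    i ≤ pvNextHeader lines i ∨ pvNextHeader lines i = lines.length := by
  fun_induction pvNextHeader lines i with
  | case1 => omega
  | case2 _ _ _ ih => omega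
  | case3 => omega

-- the 'while rest:' loop of B: slice off one entry at a time
def pvCollect (rest : List String) : List String :=
  if hr : rest = [] then []
  else
    let j := pvNextHeader rest 1
    PySem.Str.join "\n" (rest.take j) :: pvCollect (rest.drop j)
termination_by rest.length
decreasing_by
  have h1 : 1 ≤ pvNextHeader rest 1 ∨ pvNextHeader rest 1 = rest.length := pvNextHeader_ge rest 1
  have h2 : 0 < rest.length := List.length_pos_iff.mpr hr
  simp only [List.length_drop]; omega

def recent_work_entries_alt (text : String) (limit : Int) : String :=
  let lines := PySem.Str.splitlines text
  let first := pvNextHeader lines 0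
  -- lines[:first] / lines[first:] with 0 ≤ first ≤ len(lines): exactly take/drop
  let pfx := lines.take first
  let entries := pvCollect (lines.drop first)
  PySem.Str.strip (PySem.Str.join "\n" (pfx ++ PySem.List.slice entries none (some limit)))

-- ===== PRECONDITION & SPEC =====
def Spec_recent_work_entries (text : String) (limit : Int) (out : String) : Prop := out = recent_work_entries_alt text limit
instance (text : String) (limit : Int) (out : String) : Decidable (Spec_recent_work_entries text limit out) := by unfold Spec_recent_work_entries; infer_instance

-- ===== CLAIM (what is proved, stated in full; the proofs are below) =====
def Claim_equal_recent_work_entries : Prop := ∀ (text : String) (limit : Int), Dom_recent_work_entries text limit → Spec_recent_work_entries text limit (recent_work_entries text limit)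

-- ===== LEMMAS AND PROOFS =====

theorem pvNextHeader_shift (x : String) (xs : List String) (i : Nat) :
    pvNextHeader (x :: xs) (i + 1) = pvNextHeader xs i + 1 := by
  fun_induction pvNextHeader xs i with
  | case1 i h1 h2 =>
      rw [pvNextHeader]
      simp only [List.length_cons, List.getElem_cons_succ]
      rw [dif_pos (by omega), if_pos h2]
  | case2 i h1 h2 ih =>
      rw [pvNextHeader]
      simp only [List.length_cons, List.getElem_cons_succ]
      rw [dif_pos (by omega), if_neg h2]
      exact ih
  | case3 i h1 =>
      rw [pvNextHeader]
      simp only [List.length_cons]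
      rw [dif_neg (by omega)]

theorem pvNextHeader_take_drop (lines : List String) :
    lines.take (pvNextHeader lines 0)
        = lines.takeWhile (fun s => !PySem.Str.startswith s "## ")
    ∧ lines.drop (pvNextHeader lines 0)
        = lines.dropWhile (fun s => !PySem.Str.startswith s "## ") := by
  induction lines with
  | nil => simp [pvNextHeader]
  | cons x xs ih =>
      rw [pvNextHeader]
      simp only [List.length_cons, List.getElem_cons_zero]
      rw [dif_pos (by omega)]
      by_cases hx : PySem.Str.startswith x "## "
      · have hx' : PySem.Chars.startswith x.toList ['#', '#', ' '] = true := by simpa using hx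
        rw [if_pos hx]
        simp [List.takeWhile_cons, List.dropWhile_cons, hx']
      · have hx' : PySem.Chars.startswith x.toList ['#', '#', ' '] = false := by simpa using hx
        rw [if_neg hx, pvNextHeader_shift]
        simp [List.takeWhile_cons, List.dropWhile_cons, List.take_succ_cons,
          List.drop_succ_cons, hx', ih.1, ih.2]

theorem pvAWhile_shift (x : String) (xs : List String) (i : Nat) :
    pvAWhile (x :: xs) (i + 1) = ((pvAWhile xs i).1, (pvAWhile xs i).2 + 1) := by
  fun_induction pvAWhile xs i with
  | case1 i h1 h2 r ih =>
      have hr : r = pvAWhile xs (i + 1) := rfl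
      rw [pvAWhile]
      simp only [List.length_cons, List.getElem_cons_succ]
      rw [dif_pos (by omega), if_pos h2]
      simp [ih, hr]
  | case2 i h1 h2 =>
      rw [pvAWhile]
      simp only [List.length_cons, List.getElem_cons_succ]
      rw [dif_pos (by omega), if_neg h2]
  | case3 i h1 =>
      rw [pvAWhile]
      simp only [List.length_cons]
      rw [dif_neg (by omega)]

theorem pvAWhile_spec (lines : List String) :
    (pvAWhile lines 0).1 = lines.takeWhile (fun s => !PySem.Str.startswith s "## ")
    ∧ lines.drop (pvAWhile lines 0).2
        = lines.dropWhile (fun s => !PySem.Str.startswith s "## ") := by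
  induction lines with
  | nil => simp [pvAWhile]
  | cons x xs ih =>
      rw [pvAWhile]
      simp only [List.length_cons, List.getElem_cons_zero]
      rw [dif_pos (by omega)]
      by_cases hx : PySem.Str.startswith x "## "
      · have hx' : PySem.Chars.startswith x.toList ['#', '#', ' '] = true := by simpa using hx
        rw [if_neg (by simp [hx'])]
        simp [List.takeWhile_cons, List.dropWhile_cons, hx']
      · have hx' : PySem.Chars.startswith x.toList ['#', '#', ' '] = false := by simpa using hx
        rw [if_pos (by simp [hx'])]
        rw [pvAWhile_shift]
        simp [List.takeWhile_cons, List.dropWhile_cons, List.drop_succ_cons,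
          hx', ih.1, ih.2]

-- the grouping both sides compute, as lists of lines
def pvGroups (rest : List String) : List (List String) :=
  match rest with
  | [] => []
  | x :: xs =>
      (x :: xs.takeWhile (fun s => !PySem.Str.startswith s "## "))
        :: pvGroups (xs.dropWhile (fun s => !PySem.Str.startswith s "## "))
termination_by rest.length
decreasing_by
  have := List.length_dropWhile_le (fun s => !PySem.Str.startswith s "## ") xs
  simp only [List.length_cons]; omega

theorem pvGroups_nil : pvGroups [] = [] := by rw [pvGroups]

theorem pvGroups_cons (x : String) (xs : List String) :
    pvGroups (x :: xs)
      = (x :: xs.takeWhile (fun s => !PySem.Str.startswith s "## "))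
          :: pvGroups (xs.dropWhile (fun s => !PySem.Str.startswith s "## ")) := by
  rw [pvGroups]

def pvGather (cur : List String) (rest : List String) : List (List String) :=
  match rest with
  | [] => [cur]
  | x :: xs =>
      if PySem.Str.startswith x "## " then cur :: pvGather [x] xs
      else pvGather (cur ++ [x]) xs

theorem pvGather_eq_groups (xs : List String) (cur : List String) (hc : cur ≠ []) :
    pvGather cur xs
      = (cur ++ xs.takeWhile (fun s => !PySem.Str.startswith s "## "))
          :: pvGroups (xs.dropWhile (fun s => !PySem.Str.startswith s "## ")) := by
  induction xs generalizing cur with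
  | nil => simp [pvGather, pvGroups_nil]
  | cons y ys ih =>
      by_cases hy : PySem.Str.startswith y "## "
      · have hy' : PySem.Chars.startswith y.toList ['#', '#', ' '] = true := by simpa using hy
        rw [pvGather, if_pos hy, ih [y] (by simp)]
        simp [List.takeWhile_cons, List.dropWhile_cons, hy', pvGroups_cons]
      · have hy' : PySem.Chars.startswith y.toList ['#', '#', ' '] = false := by simpa using hy
        rw [pvGather, if_neg hy, ih (cur ++ [y]) (by simp)]
        simp [List.takeWhile_cons, List.dropWhile_cons, hy']

theorem pvFold_snd (xs : List String) (es cur : List String) (hc : cur ≠ []) :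
    (xs.foldl
        (fun (s : List String × List String) line =>
          if PySem.Str.startswith line "## " && !s.2.isEmpty then
            (s.1 ++ [PySem.Str.join "\n" s.2], [line])
          else (s.1, s.2 ++ [line])) (es, cur)).2 ≠ [] := by
  induction xs generalizing es cur with
  | nil => simpa using hc
  | cons x xs ih =>
      simp only [List.foldl_cons]
      by_cases hcond : (PySem.Str.startswith x "## " && !cur.isEmpty) = true
      · rw [if_pos hcond]
        exact ih _ [x] (by simp)
      · rw [if_neg hcond]
        exact ih _ (cur ++ [x]) (by simp)

theorem pvFold_val (xs : List String) (es cur : List String) (hc : cur ≠ []) :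
    (xs.foldl
        (fun (s : List String × List String) line =>
          if PySem.Str.startswith line "## " && !s.2.isEmpty then
            (s.1 ++ [PySem.Str.join "\n" s.2], [line])
          else (s.1, s.2 ++ [line])) (es, cur)).1
      ++ [PySem.Str.join "\n"
            (xs.foldl
              (fun (s : List String × List String) line =>
                if PySem.Str.startswith line "## " && !s.2.isEmpty then
                  (s.1 ++ [PySem.Str.join "\n" s.2], [line])
                else (s.1, s.2 ++ [line])) (es, cur)).2]
      = es ++ (pvGather cur xs).map (PySem.Str.join "\n") := by
  induction xs generalizing es cur with
  | nil => simp [pvGather]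
  | cons x xs ih =>
      have hce : cur.isEmpty = false := by simp [hc]
      simp only [List.foldl_cons]
      by_cases hx : PySem.Str.startswith x "## "
      · rw [if_pos (by rw [hx, hce]; rfl)]
        rw [ih _ [x] (by simp), pvGather, if_pos hx]
        simp
      · have hx0 : PySem.Str.startswith x "## " = false := by simpa using hx
        rw [if_neg (by rw [hx0]; simp)]
        rw [ih _ (cur ++ [x]) (by simp), pvGather, if_neg hx]

theorem pvCollect_eq_groups (rest : List String) :
    pvCollect rest = (pvGroups rest).map (PySem.Str.join "\n") := by
  fun_induction pvCollect rest with
  | case1 => simp [pvCollect, pvGroups_nil]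
  | case2 rest hr j ih =>
      cases rest with
      | nil => exact absurd rfl hr
      | cons x xs =>
          have hj : j = pvNextHeader xs 0 + 1 := pvNextHeader_shift x xs 0
          rw [hj] at ih ⊢
          rw [List.take_succ_cons, List.drop_succ_cons]
          rw [List.drop_succ_cons] at ih
          rw [ih, (pvNextHeader_take_drop xs).1, (pvNextHeader_take_drop xs).2,
            pvGroups_cons]
          simp

theorem pvNeNilIsEmpty {a : Type} (l : List a) (h : l ≠ []) : l.isEmpty = false := by
  cases l with
  | nil => exact absurd rfl h
  | cons y ys => rfl

theorem pvEntries_eq (rest : List String) :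
    (if !(rest.foldl
          (fun (s : List String × List String) line =>
            if PySem.Str.startswith line "## " && !s.2.isEmpty then
              (s.1 ++ [PySem.Str.join "\n" s.2], [line])
            else (s.1, s.2 ++ [line])) ([], [])).2.isEmpty then
        (rest.foldl
          (fun (s : List String × List String) line =>
            if PySem.Str.startswith line "## " && !s.2.isEmpty then
              (s.1 ++ [PySem.Str.join "\n" s.2], [line])
            else (s.1, s.2 ++ [line])) ([], [])).1
          ++ [PySem.Str.join "\n"
                (rest.foldl
                  (fun (s : List String × List String) line =>
                    if PySem.Str.startswith line "## " && !s.2.isEmpty then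
                      (s.1 ++ [PySem.Str.join "\n" s.2], [line])
                    else (s.1, s.2 ++ [line])) ([], [])).2]
      else
        (rest.foldl
          (fun (s : List String × List String) line =>
            if PySem.Str.startswith line "## " && !s.2.isEmpty then
              (s.1 ++ [PySem.Str.join "\n" s.2], [line])
            else (s.1, s.2 ++ [line])) ([], [])).1)
    = pvCollect rest := by
  cases rest with
  | nil => simp [pvCollect]
  | cons x xs =>
      simp only [List.foldl_cons, List.isEmpty_nil, Bool.not_true, Bool.and_false,
        Bool.false_eq_true, if_false, List.nil_append]
      have hsnd := pvFold_snd xs [] [x] (by simp)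
      rw [if_pos (by rw [pvNeNilIsEmpty _ hsnd]; rfl)]
      rw [pvFold_val xs [] [x] (by simp), List.nil_append]
      rw [pvGather_eq_groups xs [x] (by simp), pvCollect_eq_groups, pvGroups_cons]
      simp

-- ===== VERDICT (by name: the statement is the Claim_ definition above) =====
theorem recent_work_entries_spec : Claim_equal_recent_work_entries := by
  intro text limit _
  unfold Spec_recent_work_entries recent_work_entries recent_work_entries_alt
  simp only []
  by_cases hl : PySem.Str.splitlines text = []
  · rw [if_pos hl, hl]
    have h0 : pvNextHeader ([] : List String) 0 = 0 := by simp [pvNextHeader]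
    rw [h0]
    have hc : pvCollect (List.drop 0 ([] : List String)) = [] := by simp [pvCollect]
    rw [hc]
    have hs : PySem.List.slice ([] : List String) none (some limit) = [] := by
      simp [PySem.List.slice]
    rw [hs]
    decide
  · rw [if_neg hl]
    have hA := pvAWhile_spec (PySem.Str.splitlines text)
    have hB := pvNextHeader_take_drop (PySem.Str.splitlines text)
    rw [PySem.List.slice_from_natCast]
    rw [hA.2, hA.1, ← hB.1, ← hB.2]
    rw [pvEntries_eq]
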